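-- pv_equiv track=rewrite | github.com/pjot/advent-of-code | 2020/17/17.py | bounds_3d
-- ===== SOURCE A (Python) =====
-- def bounds_3d(g):
--     minx = miny = minz = 100
--     maxx = maxy = maxz = -100
--     for p, c in g.items():
--         if c == '.':
--             continue
--         x, y, z = p
--         minx = min(minx, x)
--         miny = min(miny, y)
--         minz = min(minz, z)
--
--         maxx = max(maxx, x)
--         maxy = max(maxy, y)
--         maxz = max(maxz, z)
--
--     return minx, maxx, miny, maxy, minz, maxz
-- ===== SOURCE B (Python) =====
-- def bounds_3d(g):
--     active = [p for p, c in g.items() if c != '.']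
--     minx = min([100] + [p[0] for p in active])
--     maxx = max([-100] + [p[0] for p in active])
--     miny = min([100] + [p[1] for p in active])
--     maxy = max([-100] + [p[1] for p in active])
--     minz = min([100] + [p[2] for p in active])
--     maxz = max([-100] + [p[2] for p in active])
--     return minx, maxx, miny, maxy, minz, maxz
-- ===== Notes on version B (the rewrite author's own statement) =====
-- stated objective: alternative
-- what changed: Replaces A's single pass maintaining six accumulators with a filter of the active cells followed by six independent min/max reductions (each seeded with the original 100/-100 sentinel).
import Mathlib
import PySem

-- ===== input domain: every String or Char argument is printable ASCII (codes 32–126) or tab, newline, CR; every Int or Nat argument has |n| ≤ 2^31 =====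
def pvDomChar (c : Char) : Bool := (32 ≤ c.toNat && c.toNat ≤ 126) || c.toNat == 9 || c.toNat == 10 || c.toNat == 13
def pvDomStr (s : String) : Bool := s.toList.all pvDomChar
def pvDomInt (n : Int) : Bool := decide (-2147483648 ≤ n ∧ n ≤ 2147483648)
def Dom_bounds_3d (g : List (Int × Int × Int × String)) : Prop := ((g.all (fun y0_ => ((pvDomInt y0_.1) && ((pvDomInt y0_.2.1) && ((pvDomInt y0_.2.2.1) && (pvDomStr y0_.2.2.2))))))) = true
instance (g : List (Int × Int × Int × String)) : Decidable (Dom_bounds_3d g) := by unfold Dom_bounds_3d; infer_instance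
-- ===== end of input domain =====

-- B replaces A's six-accumulator single pass by a filter of the active cells
-- followed by six independent sentinel-seeded min/max reductions (alternative
-- decomposition, same cost).

-- ===== PORT A =====
-- one pass over the items, updating six accumulators, skipping '.' cells
def bounds_3d (g : List (Int × Int × Int × String)) : Int × Int × Int × Int × Int × Int :=
  g.foldl
    (fun st pc =>
      if pc.2.2.2 == "." then st
      else
        (min st.1 pc.1, max st.2.1 pc.1,
         min st.2.2.1 pc.2.1, max st.2.2.2.1 pc.2.1,
         min st.2.2.2.2.1 pc.2.2.1, max st.2.2.2.2.2 pc.2.2.1))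
    (100, -100, 100, -100, 100, -100)

-- ===== PORT B =====
-- filter the active cell coordinates, then six independent reductions,
-- each seeded with the sentinel (min([100] + xs) = foldl min 100 xs)
def bounds_3d_alt (g : List (Int × Int × Int × String)) : Int × Int × Int × Int × Int × Int :=
  let active := (g.filter (fun pc => !(pc.2.2.2 == "."))).map
    (fun pc => (pc.1, pc.2.1, pc.2.2.1))
  ((active.map (fun p => p.1)).foldl min 100,
   (active.map (fun p => p.1)).foldl max (-100),
   (active.map (fun p => p.2.1)).foldl min 100,
   (active.map (fun p => p.2.1)).foldl max (-100),
   (active.map (fun p => p.2.2)).foldl min 100,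
   (active.map (fun p => p.2.2)).foldl max (-100))

-- ===== PRECONDITION & SPEC =====
def Spec_bounds_3d (g : List (Int × Int × Int × String)) (out : Int × Int × Int × Int × Int × Int) : Prop := out = bounds_3d_alt g
instance (g : List (Int × Int × Int × String)) (out : Int × Int × Int × Int × Int × Int) : Decidable (Spec_bounds_3d g out) := by unfold Spec_bounds_3d; infer_instance

-- ===== CLAIM (what is proved, stated in full; the proofs are below) =====
def Claim_equal_bounds_3d : Prop := ∀ (g : List (Int × Int × Int × String)), Dom_bounds_3d g → Spec_bounds_3d g (bounds_3d g)

-- ===== LEMMAS AND PROOFS =====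

-- loop invariant: A's fold from any six accumulators equals six independent
-- reductions over the projected coordinates of the non-'.' items, seeded with
-- those accumulators
theorem bounds_3d_fold_eq (g : List (Int × Int × Int × String))
    (a b c d e f : Int) :
    g.foldl
      (fun st pc =>
        if pc.2.2.2 == "." then st
        else
          (min st.1 pc.1, max st.2.1 pc.1,
           min st.2.2.1 pc.2.1, max st.2.2.2.1 pc.2.1,
           min st.2.2.2.2.1 pc.2.2.1, max st.2.2.2.2.2 pc.2.2.1))
      (a, b, c, d, e, f) =
    (((g.filter (fun pc => !(pc.2.2.2 == "."))).map (fun pc => pc.1)).foldl min a,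
     ((g.filter (fun pc => !(pc.2.2.2 == "."))).map (fun pc => pc.1)).foldl max b,
     ((g.filter (fun pc => !(pc.2.2.2 == "."))).map (fun pc => pc.2.1)).foldl min c,
     ((g.filter (fun pc => !(pc.2.2.2 == "."))).map (fun pc => pc.2.1)).foldl max d,
     ((g.filter (fun pc => !(pc.2.2.2 == "."))).map (fun pc => pc.2.2.1)).foldl min e,
     ((g.filter (fun pc => !(pc.2.2.2 == "."))).map (fun pc => pc.2.2.1)).foldl max f) := by
  induction g generalizing a b c d e f with
  | nil => simp
  | cons h t ih =>
    by_cases hc : h.2.2.2 == "."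
    · simp only [List.foldl_cons, List.filter_cons, hc, Bool.not_true, if_true,
        Bool.false_eq_true, if_false]
      exact ih a b c d e f
    · have hc' : (h.2.2.2 == ".") = false := by simpa using hc
      simp only [List.foldl_cons, List.filter_cons, hc', Bool.not_false, if_true,
        Bool.false_eq_true, if_false, List.map_cons]
      exact ih _ _ _ _ _ _

-- ===== VERDICT (by name: the statement is the Claim_ definition above) =====
theorem bounds_3d_spec : Claim_equal_bounds_3d := by
  intro g _
  unfold Spec_bounds_3d bounds_3d bounds_3d_alt
  simp only [List.map_map, Function.comp]
  exact bounds_3d_fold_eq g 100 (-100) 100 (-100) 100 (-100)
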